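-- pv_equiv track=rewrite | github.com/ADarvishi82/nqueens-heuristics-ai-assignment | ten_heuristic_n_queens.py | h3_max_future_freedom
-- ===== SOURCE A (Python) =====
-- def h1_attacking_pairs(board):
--     n = len(board)
--     threats = 0
--     placed_queens_pos = []
--     for col, row in enumerate(board):
--         if row != -1:
--             placed_queens_pos.append((col, row))
--
--     for i in range(len(placed_queens_pos)):
--         for j in range(i + 1, len(placed_queens_pos)):
--             col1, row1 = placed_queens_pos[i]
--             col2, row2 = placed_queens_pos[j]
--             if row1 == row2 or abs(row1 - row2) == abs(col1 - col2):
--                 threats += 1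
--     return threats
--
-- def h3_max_future_freedom(board):
--     n = len(board)
--     next_col_to_fill = -1
--     for i in range(n):
--         if board[i] == -1:
--             next_col_to_fill = i
--             break
--     if next_col_to_fill == -1: # Board is full
--         return h1_attacking_pairs(board)
--
--     threatened_count = 0 # تعداد خانه‌های تهدید شده در ستون‌های باقی‌مانده
--     remaining_cols = n - next_col_to_fill
--
--     # ایجاد یک کپی از صفحه برای بررسی تهدیدها بدون تغییر وضعیت اصلی
--     temp_board_for_checking = [[False for _ in range(n)] for _ in range(n)]
--
--     # نشانه‌گذاری خانه‌های تهدید شده توسط وزیران فعلی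
--     for c_placed in range(next_col_to_fill):
--         r_placed = board[c_placed]
--         for r_target in range(n): # تهدید سطری
--             if not temp_board_for_checking[r_target][c_placed]: # فقط برای ستون‌های آتی
--                  for c_future in range(next_col_to_fill, n):
--                       if r_target == r_placed:
--                            temp_board_for_checking[r_target][c_future] = True
--         for c_target in range(n): # تهدید ستونی (برای ستون‌های آتی معنی ندارد چون در هر ستون یک وزیر است)
--             pass
--         # تهدید قطری
--         for r_target in range(n):
--             for c_target in range(next_col_to_fill, n):
--                 if abs(r_placed - r_target) == abs(c_placed - c_target):
--                     temp_board_for_checking[r_target][c_target] = True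
--
--     safe_cells_in_future = 0
--     for r_ in range(n):
--         for c_ in range(next_col_to_fill, n):
--             if not temp_board_for_checking[r_][c_]:
--                 safe_cells_in_future += 1
--
--     # می‌خواهیم خانه‌های امن را حداکثر کنیم، پس هزینه، معکوس آن است
--     # یا (تعداد کل خانه‌های ممکن در آینده - خانه‌های امن)
--     max_possible_future_cells = n * remaining_cols
--     return max_possible_future_cells - safe_cells_in_future
-- ===== SOURCE B (Python) =====
-- def h3_max_future_freedom(board):
--     # Return-value equivalent to A: no n x n boolean grid and no marking passes;
--     # each future cell is tested directly against the placed queens, and the full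
--     # board case counts attacking pairs with one triangular scan over the board
--     # itself (no intermediate list of placed positions).
--     n = len(board)
--     if -1 not in board:
--         # board is full: count attacking pairs directly
--         pairs = 0
--         for j in range(n):
--             for i in range(j):
--                 if board[i] == board[j] or abs(board[i] - board[j]) == j - i:
--                     pairs += 1
--         return pairs
--     next_col = board.index(-1)
--     threatened = 0
--     for r in range(n):
--         for c in range(next_col, n):
--             if any(board[cp] == r or abs(board[cp] - r) == abs(cp - c)
--                    for cp in range(next_col)):
--                 threatened += 1
--     return threatened
-- ===== Notes on version B (the rewrite author's own statement) =====
-- stated objective: simpler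
-- what changed: B drops A's n x n boolean grid and its two marking passes plus the safe-cell subtraction, testing each future cell directly against the placed queens and counting threatened cells; the full-board branch counts attacking pairs in one triangular scan over the board itself instead of building a placed-positions list and indexing into it.
import Mathlib
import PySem

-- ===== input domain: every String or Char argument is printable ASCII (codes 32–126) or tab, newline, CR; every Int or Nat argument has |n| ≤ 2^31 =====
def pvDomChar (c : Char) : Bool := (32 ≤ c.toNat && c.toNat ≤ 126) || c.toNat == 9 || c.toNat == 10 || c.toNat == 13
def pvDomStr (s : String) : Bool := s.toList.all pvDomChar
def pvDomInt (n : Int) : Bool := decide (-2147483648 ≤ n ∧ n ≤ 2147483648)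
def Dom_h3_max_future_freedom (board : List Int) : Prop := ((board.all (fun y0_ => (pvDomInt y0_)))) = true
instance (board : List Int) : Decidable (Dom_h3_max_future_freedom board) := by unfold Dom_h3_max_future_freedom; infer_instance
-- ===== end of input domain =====

-- B changes the algorithm (no n×n boolean grid, direct per-cell queen scan; full-board
-- branch counts pairs in one triangular scan without the intermediate placed list);
-- objective: simpler, return value proved identical.

-- ===== PORT A =====
-- helper of the same module, used by A on a full board
def h1_attacking_pairs (board : List Int) : Int :=
  -- placed_queens_pos: append (col,row) for each entry with row != -1
  let placed : List (Int × Int) :=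
    (PySem.List.enumerate board 0).foldl
      (fun acc p => if p.2 ≠ -1 then acc ++ [p] else acc) []
  -- for i in range(len(placed)): for j in range(i+1, len(placed)): …
  (List.range placed.length).foldl
    (fun th i =>
      (List.range' (i+1) (placed.length - (i+1))).foldl
        (fun th j =>
          let p1 := placed.getD i (0, 0)
          let p2 := placed.getD j (0, 0)
          if p1.2 = p2.2 ∨ |p1.2 - p2.2| = |p1.1 - p2.1| then th + 1 else th)
        th)
    0

-- 'next_col_to_fill = -1; for i in range(n): if board[i] == -1: next_col_to_fill = i; break'
-- ported as a first-index scan; none plays the role of the sentinel -1.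
def pvFindEmptyA : List Int → Option Nat
  | [] => none
  | x :: xs => if x = -1 then some 0 else (pvFindEmptyA xs).map (· + 1)

-- grid cell read/write: temp[r][c] and temp[r][c] = True (indices are in range wherever A executes them)
def pvGget (g : List (List Bool)) (r c : Nat) : Bool := (g.getD r []).getD c false
def pvGset (g : List (List Bool)) (r c : Nat) : List (List Bool) :=
  g.modify r (fun row => row.set c true)

def h3_max_future_freedom (board : List Int) : Int :=
  let n := board.length
  match pvFindEmptyA board with
  | none => h1_attacking_pairs board  -- board is full
  | some nc =>
    -- temp_board_for_checking = [[False]*n]*n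
    let grid0 : List (List Bool) := List.replicate n (List.replicate n false)
    -- for c_placed in range(next_col_to_fill): …
    let grid :=
      (List.range nc).foldl
        (fun g cp =>
          let rp := board.getD cp 0   -- board[c_placed]; cp < n so getD is exact
          -- row-threat pass (the pass over c_target in range(n) is 'pass' and ports to nothing)
          let g :=
            (List.range n).foldl
              (fun g rt =>
                if !(pvGget g rt cp) then
                  (List.range' nc (n - nc)).foldl
                    (fun g (cf : Nat) => if (rt : Int) = rp then pvGset g rt cf else g) g
                else g)
              g
          -- diagonal-threat pass
          (List.range n).foldl
            (fun g (rt : Nat) =>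
              (List.range' nc (n - nc)).foldl
                (fun g (ct : Nat) =>
                  if |rp - (rt : Int)| = |(cp : Int) - (ct : Int)| then pvGset g rt ct else g)
                g)
            g)
        grid0
    -- safe_cells_in_future
    let safe :=
      (List.range n).foldl
        (fun s r =>
          (List.range' nc (n - nc)).foldl
            (fun s c => if !(pvGget grid r c) then s + 1 else s) s)
        (0 : Int)
    (n : Int) * ((n : Int) - (nc : Int)) - safe

-- ===== PORT B =====
def h3_max_future_freedom_alt (board : List Int) : Int :=
  let n := board.length
  if !(board.contains (-1)) then
    -- board is full: one triangular scan over the board itself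
    (List.range n).foldl
      (fun p (j : Nat) =>
        (List.range j).foldl
          (fun p (i : Nat) =>
            if board.getD i 0 = board.getD j 0 ∨
               |board.getD i 0 - board.getD j 0| = ((j : Int) - (i : Int))
            then p + 1 else p)
          p)
      0
  else
    let nc := (PySem.List.index? board (-1)).getD 0   -- board.index(-1); -1 ∈ board here
    (List.range n).foldl
      (fun t (r : Nat) =>
        (List.range' nc (n - nc)).foldl
          (fun t (c : Nat) =>
            if (List.range nc).any
                 (fun cp => decide (board.getD cp 0 = (r : Int)) ||
                            decide (|board.getD cp 0 - (r : Int)| = |(cp : Int) - (c : Int)|))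
            then t + 1 else t)
          t)
      0

-- ===== PRECONDITION & SPEC =====
def Spec_h3_max_future_freedom (board : List Int) (out : Int) : Prop := out = h3_max_future_freedom_alt board
instance (board : List Int) (out : Int) : Decidable (Spec_h3_max_future_freedom board out) := by unfold Spec_h3_max_future_freedom; infer_instance

-- ===== CLAIM (what is proved, stated in full; the proofs are below) =====
def Claim_equal_h3_max_future_freedom : Prop := ∀ (board : List Int), Dom_h3_max_future_freedom board → Spec_h3_max_future_freedom board (h3_max_future_freedom board)


-- ===== LEMMAS AND PROOFS =====

-- ---- grid basics ----
def pvWf (n : Nat) (g : List (List Bool)) : Prop :=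
  g.length = n ∧ ∀ (r : Nat) (row : List Bool), g[r]? = some row → row.length = n

theorem pvGget_eq (g : List (List Bool)) (r c : Nat) :
    pvGget g r c = ((g[r]?.getD [])[c]?.getD false) := by
  unfold pvGget
  rw [List.getD_eq_getElem?_getD, List.getD_eq_getElem?_getD]

theorem pvWf_gset {n : Nat} {g : List (List Bool)} (h : pvWf n g) (r c : Nat) :
    pvWf n (pvGset g r c) := by
  obtain ⟨h1, h2⟩ := h
  refine ⟨by simp [pvGset, h1], ?_⟩
  intro r' row hr'
  unfold pvGset at hr'
  rw [List.getElem?_modify] at hr'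
  cases hg : g[r']? with
  | none =>
      rw [hg] at hr'
      cases hr'
  | some row0 =>
    rw [hg] at hr'
    injection hr' with hr'
    simp only [] at hr'
    by_cases hrr : r = r'
    · rw [if_pos hrr] at hr'
      rw [← hr', List.length_set]
      exact h2 r' row0 hg
    · rw [if_neg hrr] at hr'
      rw [← hr']
      exact h2 r' row0 hg

theorem pvGget_gset {n : Nat} {g : List (List Bool)} (h : pvWf n g) {r c : Nat}
    (hr : r < n) (hc : c < n) (r' c' : Nat) :
    pvGget (pvGset g r c) r' c' = if r' = r ∧ c' = c then true else pvGget g r' c' := by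
  obtain ⟨h1, h2⟩ := h
  have hrl : r < g.length := by omega
  rw [pvGget_eq, pvGget_eq]
  unfold pvGset
  rw [List.getElem?_modify]
  by_cases hrr : r = r'
  · subst hrr
    have hsome : g[r]? = some g[r] := List.getElem?_eq_getElem hrl
    have hrow : (g[r]).length = n := h2 r _ hsome
    rw [hsome]
    by_cases hcc : c = c'
    · subst hcc
      simp [hrow, hc]
    · simp [hcc]
      intro h
      exact absurd h.symm hcc
  · have hne : ¬(r' = r ∧ c' = c) := fun h => hrr h.1.symm
    rw [if_neg hne]
    simp [hrr]

-- ---- effect of one inner marking loop (fixed row, conditional set per column) ----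
theorem pvMarkCols {n : Nat} (cols : List Nat) (q : Nat → Prop) [DecidablePred q]
    (rt : Nat) (hrt : rt < n) (hcols : ∀ c ∈ cols, c < n)
    (g : List (List Bool)) (hwf : pvWf n g) :
    pvWf n (cols.foldl (fun g ct => if q ct then pvGset g rt ct else g) g) ∧
    ∀ r c : Nat, pvGget (cols.foldl (fun g ct => if q ct then pvGset g rt ct else g) g) r c
      = (pvGget g r c || decide (r = rt ∧ c ∈ cols ∧ q c)) := by
  induction cols generalizing g with
  | nil => simp [hwf]
  | cons x xs ih =>
    have hx : x < n := hcols x (by simp)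
    have hxs : ∀ c ∈ xs, c < n := fun c hc => hcols c (by simp [hc])
    by_cases hq : q x
    · have hwf' := pvWf_gset hwf rt x
      obtain ⟨w, e⟩ := ih hxs (pvGset g rt x) hwf'
      refine ⟨by simpa [hq] using w, fun r c => ?_⟩
      simp only [List.foldl_cons, if_pos hq]
      rw [e r c, pvGget_gset hwf hrt hx r c]
      by_cases h1 : r = rt <;> by_cases h2 : c = x
      · subst h1; subst h2; simp [hq]
      · simp [h1, h2]
      · subst h2; simp [h1]
      · simp [h1, h2]
    · obtain ⟨w, e⟩ := ih hxs g hwf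
      refine ⟨by simpa [hq] using w, fun r c => ?_⟩
      simp only [List.foldl_cons, if_neg hq]
      rw [e r c]
      by_cases h2 : c = x
      · subst h2; simp [hq]
      · simp [h2]

-- ---- effect of the diagonal-marking double loop ----
theorem pvMarkRows {n : Nat} (rows cols : List Nat) (Q : Nat → Nat → Prop)
    [∀ a b, Decidable (Q a b)]
    (hrows : ∀ r ∈ rows, r < n) (hcols : ∀ c ∈ cols, c < n)
    (g : List (List Bool)) (hwf : pvWf n g) :
    pvWf n (rows.foldl (fun g rt => cols.foldl (fun g ct => if Q rt ct then pvGset g rt ct else g) g) g) ∧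
    ∀ r c : Nat, pvGget (rows.foldl (fun g rt => cols.foldl (fun g ct => if Q rt ct then pvGset g rt ct else g) g) g) r c
      = (pvGget g r c || decide (r ∈ rows ∧ c ∈ cols ∧ Q r c)) := by
  induction rows generalizing g with
  | nil => simp [hwf]
  | cons rt rs ih =>
    have hrt : rt < n := hrows rt (by simp)
    have hrs : ∀ r ∈ rs, r < n := fun r hr => hrows r (by simp [hr])
    obtain ⟨w1, e1⟩ := pvMarkCols cols (Q rt) rt hrt hcols g hwf
    obtain ⟨w2, e2⟩ := ih hrs _ w1
    refine ⟨w2, fun r c => ?_⟩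
    simp only [List.foldl_cons]
    rw [e2 r c, e1 r c]
    by_cases h1 : r = rt
    · subst h1; simp; tauto
    · simp [h1]

-- ---- effect of the guarded row-marking double loop (pass 1) ----
theorem pvMarkRowsG {n : Nat} (rows cols : List Nat) (Q : Nat → Prop) [DecidablePred Q]
    (cp : Nat) (hcp : cp ∉ cols)
    (hrows : ∀ r ∈ rows, r < n) (hcols : ∀ c ∈ cols, c < n)
    (g : List (List Bool)) (hwf : pvWf n g)
    (hguard : ∀ r ∈ rows, pvGget g r cp = false) :
    pvWf n (rows.foldl (fun g rt => if !(pvGget g rt cp) then cols.foldl (fun g cf => if Q rt then pvGset g rt cf else g) g else g) g) ∧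
    ∀ r c : Nat, pvGget (rows.foldl (fun g rt => if !(pvGget g rt cp) then cols.foldl (fun g cf => if Q rt then pvGset g rt cf else g) g else g) g) r c
      = (pvGget g r c || decide (r ∈ rows ∧ c ∈ cols ∧ Q r)) := by
  induction rows generalizing g with
  | nil => simp [hwf]
  | cons rt rs ih =>
    have hrt : rt < n := hrows rt (by simp)
    have hrs : ∀ r ∈ rs, r < n := fun r hr => hrows r (by simp [hr])
    have hg0 : pvGget g rt cp = false := hguard rt (by simp)
    obtain ⟨w1, e1⟩ := pvMarkCols cols (fun _ => Q rt) rt hrt hcols g hwf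
    have hguard' : ∀ r ∈ rs, pvGget (cols.foldl (fun g cf => if Q rt then pvGset g rt cf else g) g) r cp = false := by
      intro r hr
      rw [e1 r cp]
      simp [hcp, hguard r (by simp [hr])]
    obtain ⟨w2, e2⟩ := ih hrs _ w1 hguard'
    refine ⟨by simpa [hg0] using w2, fun r c => ?_⟩
    simp only [List.foldl_cons, hg0, Bool.not_false, if_pos]
    rw [e2 r c, e1 r c]
    by_cases h1 : r = rt
    · subst h1; simp; tauto
    · simp [h1]

-- ---- the threatened-cell predicate (B's per-cell test) and the grid invariant ----
def pvAttacked (board : List Int) (k : Nat) (r c : Nat) : Bool :=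
  (List.range k).any
    (fun cp => decide (board.getD cp 0 = (r : Int)) ||
               decide (|board.getD cp 0 - (r : Int)| = |(cp : Int) - (c : Int)|))

def pvQueenStep (board : List Int) (nc n : Nat) (g : List (List Bool)) (cp : Nat) : List (List Bool) :=
  let rp := board.getD cp 0
  let g :=
    (List.range n).foldl
      (fun g rt =>
        if !(pvGget g rt cp) then
          (List.range' nc (n - nc)).foldl
            (fun g (cf : Nat) => if (rt : Int) = rp then pvGset g rt cf else g) g
        else g)
      g
  (List.range n).foldl
    (fun g (rt : Nat) =>
      (List.range' nc (n - nc)).foldl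
        (fun g (ct : Nat) =>
          if |rp - (rt : Int)| = |(cp : Int) - (ct : Int)| then pvGset g rt ct else g)
        g)
    g

def pvGood (board : List Int) (nc n k : Nat) (g : List (List Bool)) : Prop :=
  pvWf n g ∧ ∀ r c : Nat, r < n → c < n →
    pvGget g r c = (decide (nc ≤ c) && pvAttacked board k r c)

theorem pvMemCols {nc n c : Nat} (hnc : nc ≤ n) :
    c ∈ List.range' nc (n - nc) ↔ nc ≤ c ∧ c < n := by
  rw [List.mem_range'_1]
  omega

theorem pvStep (board : List Int) {nc n k : Nat} (hk : k < nc) (hnc : nc ≤ n)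
    {g : List (List Bool)} (hg : pvGood board nc n k g) :
    pvGood board nc n (k + 1) (pvQueenStep board nc n g k) := by
  obtain ⟨hwf, hval⟩ := hg
  have hkn : k < n := by omega
  have hcp : k ∉ List.range' nc (n - nc) := by
    rw [pvMemCols hnc]; omega
  have hrows : ∀ r ∈ List.range n, r < n := by simp
  have hcols : ∀ c ∈ List.range' nc (n - nc), c < n := by
    intro c hc; exact ((pvMemCols hnc).mp hc).2
  have hguard : ∀ r ∈ List.range n, pvGget g r k = false := by
    intro r hr
    rw [hval r k (by simpa using hr) hkn]
    simp [Nat.not_le.mpr hk]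
  obtain ⟨w1, e1⟩ := pvMarkRowsG (n := n) (List.range n) (List.range' nc (n - nc))
    (fun rt => (rt : Int) = board.getD k 0) k hcp hrows hcols g hwf hguard
  obtain ⟨w2, e2⟩ := pvMarkRows (n := n) (List.range n) (List.range' nc (n - nc))
    (fun rt ct => |board.getD k 0 - (rt : Int)| = |(k : Int) - (ct : Int)|) hrows hcols _ w1
  refine ⟨w2, fun r c hr hc => ?_⟩
  simp only [pvQueenStep]
  rw [e2 r c, e1 r c, hval r c hr hc]
  have hatt : pvAttacked board (k + 1) r c
      = (pvAttacked board k r c ||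
         (decide (board.getD k 0 = (r : Int)) ||
          decide (|board.getD k 0 - (r : Int)| = |(k : Int) - (c : Int)|))) := by
    unfold pvAttacked
    rw [List.range_succ, List.any_append]
    simp
  rw [hatt]
  by_cases hle : nc ≤ c
  · have hmem : c ∈ List.range' nc (n - nc) := (pvMemCols hnc).mpr ⟨hle, hc⟩
    simp only [hle, decide_true, Bool.true_and, hmem, hr, List.mem_range]
    simp [eq_comm, Bool.or_assoc]
  · have hmem : c ∉ List.range' nc (n - nc) := by rw [pvMemCols hnc]; omega
    simp [hle, hmem]

theorem pvGridGood (board : List Int) {nc n : Nat} (hnc : nc ≤ n) :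
    ∀ k, k ≤ nc →
      pvGood board nc n k
        ((List.range k).foldl (pvQueenStep board nc n)
          (List.replicate n (List.replicate n false))) := by
  intro k
  induction k with
  | zero =>
    intro _
    rw [List.range_zero, List.foldl_nil]
    refine ⟨⟨by simp, ?_⟩, fun r c hr hc => ?_⟩
    · intro r row h
      rw [List.getElem?_replicate] at h
      by_cases hrn : r < n
      · rw [if_pos hrn] at h; cases h; simp
      · rw [if_neg hrn] at h; cases h
    simp [pvGget, pvAttacked, List.getD_eq_getElem?_getD, hr, hc]
  | succ k ih =>
    intro hk
    rw [List.range_succ, List.foldl_append]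
    exact pvStep board (by omega) hnc (ih (by omega))

-- ---- counting: safe cells vs threatened cells ----
theorem pvCountSplit (cols : List Nat) (b : Nat → Bool) :
    (cols.countP (fun c => !(b c)) : Int) + (cols.countP b : Int) = cols.length := by
  induction cols with
  | nil => simp
  | cons x xs ih =>
    by_cases hx : b x <;> simp [hx] <;> omega

-- ---- the triangular pair count: row-major and column-major agree ----
theorem pvTriSwap (f : Nat → Nat → Bool) (n : Nat) :
    ((List.range n).map (fun i => ((List.range' (i + 1) (n - (i + 1))).countP (f i) : Int))).sum
      = ((List.range n).map (fun j => ((List.range j).countP (fun i => f i j) : Int))).sum := by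
  induction n with
  | zero => simp
  | succ n ih =>
    rw [List.range_succ, List.map_append, List.map_append, List.sum_append, List.sum_append]
    have hL : ∀ i ∈ List.range n,
        ((List.range' (i + 1) (n + 1 - (i + 1))).countP (f i) : Int)
          = ((List.range' (i + 1) (n - (i + 1))).countP (f i) : Int)
            + (if f i n then (1 : Int) else 0) := by
      intro i hi
      rw [List.mem_range] at hi
      have h1 : n + 1 - (i + 1) = (n - (i + 1)) + 1 := by omega
      have h2 : i + 1 + (n - (i + 1)) = n := by omega
      rw [h1, List.range'_concat]
      simp only [Nat.one_mul, h2, List.countP_append]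
      by_cases hf : f i n <;> simp [hf]
    rw [List.map_congr_left hL]
    have : (List.map (fun i => ((List.range' (i + 1) (n - (i + 1))).countP (f i) : Int)
              + (if f i n then (1 : Int) else 0)) (List.range n)).sum
        = ((List.range n).map (fun i => ((List.range' (i + 1) (n - (i + 1))).countP (f i) : Int))).sum
          + ((List.range n).map (fun i => (if f i n then (1 : Int) else 0))).sum := by
      rw [← List.sum_map_add]
    rw [this, ih, PySem.List.sum_map_ite_one_zero]
    simp



theorem pvSumSub (l : List Nat) (f g : Nat → Int) :
    (l.map (fun x => f x - g x)).sum = (l.map f).sum - (l.map g).sum := by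
  induction l with
  | nil => simp
  | cons x xs ih => simp [ih]; ring

-- ---- the main branch: A's grid count equals B's direct count ----
theorem pvMainEq (board : List Int) (nc : Nat) (hnc : nc ≤ board.length) :
    (board.length : Int) * ((board.length : Int) - (nc : Int)) -
      (List.range board.length).foldl
        (fun s r =>
          (List.range' nc (board.length - nc)).foldl
            (fun s c =>
              if !(pvGget ((List.range nc).foldl (pvQueenStep board nc board.length)
                    (List.replicate board.length (List.replicate board.length false))) r c)
              then s + 1 else s)
            s)
        0
    = (List.range board.length).foldl
        (fun t r =>
          (List.range' nc (board.length - nc)).foldl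
            (fun t c => if pvAttacked board nc r c then t + 1 else t)
            t)
        0 := by
  obtain ⟨hwf, hval⟩ := pvGridGood board (nc := nc) (n := board.length) hnc nc le_rfl
  simp only [PySem.List.foldl_if_add_one, PySem.List.foldl_add]
  have hpt : ∀ r ∈ List.range board.length,
      (((List.range' nc (board.length - nc)).countP
          (fun c => !(pvGget ((List.range nc).foldl (pvQueenStep board nc board.length)
            (List.replicate board.length (List.replicate board.length false))) r c))) : Int)
      = ((board.length - nc : Nat) : Int)
        - ((List.range' nc (board.length - nc)).countP (fun c => pvAttacked board nc r c) : Int) := by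
    intro r hr
    rw [List.mem_range] at hr
    have hcong : (List.range' nc (board.length - nc)).countP
          (fun c => !(pvGget ((List.range nc).foldl (pvQueenStep board nc board.length)
            (List.replicate board.length (List.replicate board.length false))) r c))
        = (List.range' nc (board.length - nc)).countP (fun c => !(pvAttacked board nc r c)) := by
      apply List.countP_congr
      intro c hcmem
      obtain ⟨hc1, hc2⟩ := (pvMemCols hnc).mp hcmem
      rw [hval r c hr hc2]
      simp [hc1]
    rw [hcong]
    have := pvCountSplit (List.range' nc (board.length - nc)) (fun c => pvAttacked board nc r c)
    rw [List.length_range'] at this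
    omega
  rw [List.map_congr_left hpt, pvSumSub]
  have hconst : ((List.range board.length).map
      (fun _ => ((board.length - nc : Nat) : Int))).sum
      = (board.length : Int) * ((board.length - nc : Nat) : Int) := by
    rw [List.map_const', List.sum_replicate, List.length_range]
    simp
  rw [hconst]
  have hcast : ((board.length - nc : Nat) : Int) = (board.length : Int) - (nc : Int) := by
    omega
  rw [hcast]
  ring

-- ---- the first-empty-column scan is list.index(-1) ----
theorem pvFind_eq (board : List Int) :
    pvFindEmptyA board = PySem.List.index? board (-1) := by
  induction board with
  | nil => rfl
  | cons x xs ih =>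
    by_cases hx : x = -1
    · subst hx
      rw [PySem.List.index?_cons_self]
      simp [pvFindEmptyA]
    · rw [PySem.List.index?_cons_of_ne _ hx]
      simp [pvFindEmptyA, hx, ih]

-- ---- the full-board branch: h1's pair scan equals B's triangular scan ----
theorem pvFullEq (board : List Int) (hni : (-1 : Int) ∉ board) :
    h1_attacking_pairs board
      = (List.range board.length).foldl
          (fun p j =>
            (List.range j).foldl
              (fun p i =>
                if board.getD i 0 = board.getD j 0 ∨
                   |board.getD i 0 - board.getD j 0| = ((j : Int) - (i : Int))
                then p + 1 else p)
              p)
          0 := by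
  simp only [h1_attacking_pairs]
  have hplaced : (PySem.List.enumerate board 0).foldl
      (fun acc p => if p.2 ≠ -1 then acc ++ [p] else acc) ([] : List (Int × Int))
      = PySem.List.enumerate board 0 := by
    rw [PySem.List.foldl_append_ite_eq_filter]
    rw [List.filter_eq_self.mpr, List.nil_append]
    intro p hp
    obtain ⟨k, hk, rfl⟩ := (PySem.List.mem_enumerate_iff _ _ _).mp hp
    simp only [decide_eq_true_eq]
    exact fun h => hni (h ▸ List.getElem_mem hk)
  rw [hplaced, PySem.List.length_enumerate]
  simp only [PySem.List.foldl_ite_add_one, PySem.List.foldl_add]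
  have hpt : ∀ i ∈ List.range board.length,
      (((List.range' (i + 1) (board.length - (i + 1))).countP
          (fun j =>
            decide (((PySem.List.enumerate board 0).getD i (0, 0)).2
                      = ((PySem.List.enumerate board 0).getD j (0, 0)).2 ∨
                    |((PySem.List.enumerate board 0).getD i (0, 0)).2
                      - ((PySem.List.enumerate board 0).getD j (0, 0)).2|
                      = |((PySem.List.enumerate board 0).getD i (0, 0)).1
                        - ((PySem.List.enumerate board 0).getD j (0, 0)).1|))) : Int)
      = (((List.range' (i + 1) (board.length - (i + 1))).countP
          (fun j =>
            decide (board.getD i 0 = board.getD j 0 ∨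
                    |board.getD i 0 - board.getD j 0| = ((j : Int) - (i : Int))))) : Int) := by
    intro i hi
    rw [List.mem_range] at hi
    congr 1
    apply List.countP_congr
    intro j hj
    rw [List.mem_range'_1] at hj
    have hjn : j < board.length := by omega
    have hij : i + 1 ≤ j := hj.1
    have hei : (PySem.List.enumerate board 0).getD i (0, 0) = ((i : Int), board[i]) := by
      rw [List.getD_eq_getElem?_getD, PySem.List.getElem?_enumerate,
        List.getElem?_eq_getElem hi]
      simp
    have hej : (PySem.List.enumerate board 0).getD j (0, 0) = ((j : Int), board[j]) := by
      rw [List.getD_eq_getElem?_getD, PySem.List.getElem?_enumerate,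
        List.getElem?_eq_getElem hjn]
      simp
    rw [hei, hej]
    have hgi : board.getD i 0 = board[i] := by
      rw [List.getD_eq_getElem?_getD, List.getElem?_eq_getElem hi]; rfl
    have hgj : board.getD j 0 = board[j] := by
      rw [List.getD_eq_getElem?_getD, List.getElem?_eq_getElem hjn]; rfl
    rw [hgi, hgj]
    have habs : |(i : Int) - (j : Int)| = (j : Int) - (i : Int) := by
      rw [abs_sub_comm, abs_of_nonneg]
      omega
    simp only [habs]
  rw [List.map_congr_left hpt]
  simp only [zero_add]
  exact pvTriSwap
    (fun i j =>
      decide (board.getD i 0 = board.getD j 0 ∨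
              |board.getD i 0 - board.getD j 0| = ((j : Int) - (i : Int))))
    board.length

-- ===== VERDICT (by name: the statement is the Claim_ definition above) =====
theorem h3_max_future_freedom_spec : Claim_equal_h3_max_future_freedom := by
  intro board _
  unfold Spec_h3_max_future_freedom
  cases hf : pvFindEmptyA board with
  | none =>
    have hni : (-1 : Int) ∉ board := by
      rw [pvFind_eq] at hf
      exact (PySem.List.index?_eq_none_iff _ _).mp hf
    have hcont : board.contains (-1) = false := by
      simpa using hni
    simp only [h3_max_future_freedom, h3_max_future_freedom_alt, hf, hcont,
      Bool.not_false, if_true]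
    exact pvFullEq board hni
  | some nc =>
    have hidx : PySem.List.index? board (-1) = some nc := by
      rw [← pvFind_eq]; exact hf
    obtain ⟨hlt, heq, -⟩ := PySem.List.getElem_of_index?_eq_some hidx
    have hmem : (-1 : Int) ∈ board := heq ▸ List.getElem_mem hlt
    have hcont : board.contains (-1) = true := by simpa using hmem
    simp only [h3_max_future_freedom, h3_max_future_freedom_alt, hf, hcont, hidx,
      Bool.not_true, Bool.false_eq_true, if_false, Option.getD_some]
    exact pvMainEq board nc (le_of_lt hlt)
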